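-- pv_equiv track=rewrite | github.com/UCLALibrary/central-search-tools | config/dl_legacy.py | map_record
-- ===== SOURCE A (Python) =====
-- def map_record(record: dict) -> dict:
--     # Still quite TBD....
--     # Remove Solr fields we don't want
--     # RELS_EXT*
--     # _version_
--     # fedora_*
--     # All fgs_* except fgs_label_s
--     # All mods_* except mods_titleInfo_title_s and mods_xml
--     # timestamp
--
--     # Easiest just to keep what we do want, for now
--     fields_to_keep = [
--         "PID",
--         "fgs_label_s",
--         "mods_titleInfo_title_s",
--         "mods_title_ms",
--         "mods_xml",
--     ]
--     record_keep = {}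
--     for fld in fields_to_keep:
--         if fld in record:
--             record_keep[fld] = record[fld]
--
--     # Also keep all Dublin Core fields (dc.*)
--     record_keep.update({k: v for k, v in record.items() if k.startswith("dc.")})
--
--     return record_keep
-- ===== SOURCE B (Python) =====
-- KEEP_SET = {
--     "PID",
--     "fgs_label_s",
--     "mods_titleInfo_title_s",
--     "mods_title_ms",
--     "mods_xml",
-- }
--
-- FIELD_ORDER = [
--     "PID",
--     "fgs_label_s",
--     "mods_titleInfo_title_s",
--     "mods_title_ms",
--     "mods_xml",
-- ]
--
--
-- def map_record(record: dict) -> dict: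
--     # one pass over the record: route each item to the named-field bucket or the dc.* list
--     picked = {}
--     dc_items = []
--     for k, v in record.items():
--         if k.startswith("dc."):
--             dc_items.append((k, v))
--         elif k in KEEP_SET:
--             picked[k] = v
--     # assemble: named fields in their fixed order, then the dc.* items in record order
--     out = {f: picked[f] for f in FIELD_ORDER if f in picked}
--     out.update(dc_items)
--     return out
-- ===== Notes on version B (the rewrite author's own statement) =====
-- stated objective: alternative
-- what changed: A probes the record once per fixed field and then makes a second comprehension pass for dc.* keys; B makes a single pass over the record routing each item into a named-field bucket or a dc.* list, then assembles the output (fixed fields in order, then dc.* items).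
import Mathlib
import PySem

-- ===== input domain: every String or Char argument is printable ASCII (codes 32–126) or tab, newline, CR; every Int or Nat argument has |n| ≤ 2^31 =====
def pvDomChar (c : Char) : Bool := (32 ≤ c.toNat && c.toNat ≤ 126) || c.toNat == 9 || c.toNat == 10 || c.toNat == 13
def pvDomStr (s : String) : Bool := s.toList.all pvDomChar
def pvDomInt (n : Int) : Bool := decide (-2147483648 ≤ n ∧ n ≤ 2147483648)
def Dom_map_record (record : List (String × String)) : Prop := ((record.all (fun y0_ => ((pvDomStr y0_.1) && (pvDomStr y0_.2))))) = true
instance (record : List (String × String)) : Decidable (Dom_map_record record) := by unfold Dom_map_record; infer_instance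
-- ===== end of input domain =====

-- B replaces A's membership probes into the record plus a second dc.* comprehension pass by ONE pass over
-- the record that routes each item to a named-field bucket or a dc.* list, then assembles the result
-- (objective: alternative single-pass decomposition; same output, including insertion order).

-- ===== PORT A =====
-- the fixed fields_to_keep list of A (also B's keep set / field order: the same five strings)
def pvFields : List String :=
  ["PID", "fgs_label_s", "mods_titleInfo_title_s", "mods_title_ms", "mods_xml"]

-- k.startswith("dc.")
def pvIsDC (k : String) : Bool := PySem.Str.startswith k "dc."

def map_record (record : List (String × String)) : List (String × String) :=
  -- the dict parameter: dict(record) — a later duplicate key overwrites, keeping first position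
  let rd : PySem.Dict String String := PySem.Dict.ofList record
  -- for fld in fields_to_keep: if fld in record: record_keep[fld] = record[fld]
  let recordKeep := pvFields.foldl
    (fun d fld => if rd.contains fld then d.insert fld (rd.getD fld "") else d)
    PySem.Dict.empty
  -- record_keep.update({k: v for k, v in record.items() if k.startswith("dc.")})
  (recordKeep.update (rd.items.filter (fun kv => pvIsDC kv.1))).items

-- ===== PORT B =====
-- the body of B's single loop over record.items()
def pvStep (acc : PySem.Dict String String × List (String × String)) (kv : String × String) :
    PySem.Dict String String × List (String × String) :=
  if pvIsDC kv.1 then (acc.1, acc.2 ++ [kv])          -- dc_items.append((k, v))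
  else if kv.1 ∈ pvFields then (acc.1.insert kv.1 kv.2, acc.2)  -- picked[k] = v
  else acc

def map_record_alt (record : List (String × String)) : List (String × String) :=
  let rd : PySem.Dict String String := PySem.Dict.ofList record
  -- one pass: picked (named fields seen) and dc_items
  let st := rd.items.foldl pvStep (PySem.Dict.empty, [])
  -- out = {f: picked[f] for f in FIELD_ORDER if f in picked}
  let out := pvFields.foldl
    (fun d f => if st.1.contains f then d.insert f (st.1.getD f "") else d)
    PySem.Dict.empty
  -- out.update(dc_items)
  (out.update st.2).items

-- ===== PRECONDITION & SPEC =====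
def Spec_map_record (record : List (String × String)) (out : List (String × String)) : Prop := out = map_record_alt record
instance (record : List (String × String)) (out : List (String × String)) : Decidable (Spec_map_record record out) := by unfold Spec_map_record; infer_instance

-- ===== CLAIM (what is proved, stated in full; the proofs are below) =====
def Claim_equal_map_record : Prop := ∀ (record : List (String × String)), Dom_map_record record → Spec_map_record record (map_record record)

-- ===== LEMMAS AND PROOFS =====

-- the second component of B's loop collects exactly the dc.* items, in order
theorem pvLoop_snd (xs : List (String × String)) (d : PySem.Dict String String)
    (dc : List (String × String)) :
    (xs.foldl pvStep (d, dc)).2 = dc ++ xs.filter (fun kv => pvIsDC kv.1) := by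
  induction xs generalizing d dc with
  | nil => simp
  | cons kv rest ih =>
    cases h : pvIsDC kv.1
    · by_cases h2 : kv.1 ∈ pvFields <;> simp [pvStep, h, h2, ih]
    · simp [pvStep, h, ih]

-- first-match lookup in a dict, as find? over its items
theorem pvGet?_mk (l : List (String × String)) (f : String) :
    (PySem.Dict.mk l).get? f = (l.find? (fun kv => kv.1 == f)).map Prod.snd := by
  induction l with
  | nil => simp [PySem.Dict.get?]
  | cons kv rest ih =>
    rw [PySem.Dict.get?_mk_cons]
    by_cases h : (kv.1 == f) = true <;> simp [h, ih]

-- the dict of B's loop is untouched at a key that never occurs in the remaining items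
theorem pvLoop_get_notmem (xs : List (String × String)) (d : PySem.Dict String String)
    (dc : List (String × String)) (f : String) (hf : f ∉ xs.map Prod.fst) :
    ((xs.foldl pvStep (d, dc)).1).get? f = d.get? f := by
  induction xs generalizing d dc with
  | nil => rfl
  | cons kv rest ih =>
    simp only [List.map_cons, List.mem_cons, not_or] at hf
    cases h : pvIsDC kv.1
    · by_cases h2 : kv.1 ∈ pvFields
      · simp only [List.foldl_cons, pvStep, h, h2, Bool.false_eq_true, if_false, if_pos]
        rw [ih _ _ hf.2, PySem.Dict.get?_insert_of_ne _ _ hf.1]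
      · simp only [List.foldl_cons, pvStep, h, h2, Bool.false_eq_true, if_false]
        exact ih _ _ hf.2
    · simp only [List.foldl_cons, pvStep, h, if_true]
      exact ih _ _ hf.2

-- at a kept named field, the dict of B's loop holds the record's first-match value
theorem pvLoop_get (xs : List (String × String)) (hnd : (xs.map Prod.fst).Nodup)
    (d : PySem.Dict String String) (dc : List (String × String)) (f : String)
    (hfld : f ∈ pvFields) (hdc : pvIsDC f = false) :
    ((xs.foldl pvStep (d, dc)).1).get? f =
      match xs.find? (fun kv => kv.1 == f) with
      | some kv => some kv.2
      | none => d.get? f := by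
  induction xs generalizing d dc with
  | nil => rfl
  | cons kv rest ih =>
    simp only [List.map_cons, List.nodup_cons] at hnd
    simp only [List.foldl_cons, List.find?_cons]
    by_cases heq : (kv.1 == f) = true
    · have heq' : kv.1 = f := by simpa using heq
      subst heq'
      simp only [heq]
      have hstep : pvStep (d, dc) kv = (d.insert kv.1 kv.2, dc) := by
        simp [pvStep, hdc, hfld]
      rw [hstep, pvLoop_get_notmem rest _ dc kv.1 hnd.1, PySem.Dict.get?_insert_self]
    · have hne : f ≠ kv.1 := fun hcon => heq (by simp [hcon])
      simp only [heq]
      cases h : pvIsDC kv.1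
      · by_cases h2 : kv.1 ∈ pvFields
        · have hstep : pvStep (d, dc) kv = (d.insert kv.1 kv.2, dc) := by
            simp [pvStep, h, h2]
          rw [hstep, ih hnd.2 _ _]
          cases hfind : rest.find? (fun kv => kv.1 == f) <;>
            simp [PySem.Dict.get?_insert_of_ne _ _ hne]
        · have hstep : pvStep (d, dc) kv = (d, dc) := by simp [pvStep, h, h2]
          rw [hstep, ih hnd.2 _ _]
      · have hstep : pvStep (d, dc) kv = (d, dc ++ [kv]) := by simp [pvStep, h]
        rw [hstep, ih hnd.2 _ _]

-- two conditional-insert folds over the same field list agree when condition and value agree on it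
theorem pvFoldl_if_congr (fs : List String) (C C' : String → Bool) (V V' : String → String)
    (d : PySem.Dict String String)
    (h : ∀ f ∈ fs, C f = C' f ∧ V f = V' f) :
    fs.foldl (fun d f => if C f then d.insert f (V f) else d) d
      = fs.foldl (fun d f => if C' f then d.insert f (V' f) else d) d := by
  induction fs generalizing d with
  | nil => rfl
  | cons f rest ih =>
    have hf := h f (by simp)
    simp only [List.foldl_cons, ← hf.1, ← hf.2]
    exact ih _ (fun g hg => h g (by simp [hg]))

-- ===== VERDICT (by name: the statement is the Claim_ definition above) =====
theorem map_record_spec : Claim_equal_map_record := by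
  intro record _
  unfold Spec_map_record map_record map_record_alt
  simp only []
  set rd : PySem.Dict String String := PySem.Dict.ofList record with hrd
  have hnd : (rd.items.map Prod.fst).Nodup := by
    have := PySem.Dict.nodup_keys_ofList (κ := String) (ν := String) record
    simpa [PySem.Dict.keys, hrd] using this
  have hget : ∀ f ∈ pvFields,
      ((rd.items.foldl pvStep (PySem.Dict.empty, [])).1).get? f = rd.get? f := by
    intro f hf
    have hdc : pvIsDC f = false := by fin_cases hf <;> decide
    rw [pvLoop_get rd.items hnd _ _ f hf hdc,
        show rd.get? f = _ from pvGet?_mk rd.items f]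
    cases hfind : rd.items.find? (fun kv => kv.1 == f) <;> simp [PySem.Dict.get?_empty]
  have hfold : pvFields.foldl
      (fun d fld => if rd.contains fld then d.insert fld (rd.getD fld "") else d)
      PySem.Dict.empty
      = pvFields.foldl
      (fun d f => if (rd.items.foldl pvStep (PySem.Dict.empty, [])).1.contains f then
          d.insert f ((rd.items.foldl pvStep (PySem.Dict.empty, [])).1.getD f "") else d)
      PySem.Dict.empty := by
    apply pvFoldl_if_congr
    intro f hf
    constructor
    · rw [PySem.Dict.contains_eq_isSome_get?, PySem.Dict.contains_eq_isSome_get?, hget f hf]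
    · rw [PySem.Dict.getD_eq_get?_getD, PySem.Dict.getD_eq_get?_getD, hget f hf]
  have hdclist : rd.items.filter (fun kv => pvIsDC kv.1)
      = (rd.items.foldl pvStep (PySem.Dict.empty, [])).2 := by
    rw [pvLoop_snd]; simp
  rw [hfold, hdclist]
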